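-- pv_equiv track=rewrite | github.com/leejeongwoo1/2022_TGwinG_NP_leejeongwoo1 | leejeongwoo_4week_assignment.py | stock_price
-- ===== SOURCE A (Python) =====
-- def stock_price(stockChart):
--     answer = str()
--     # your code
--     z=[]
--     b=0
--     x=[]
--     m=1
--     for i in stockChart:
--         b=b+(i)
--         z.append(b)
--     for v in z[:-1]:
--         L=z[-1]-v
--         x.append(L)
--     for q in range(len(x)):
--         if max(x)==x[q]:
--             m=q
--     if max(x)>0:
--         answer=str(len(x)-m)+"일 전에 샀어야지 으이구"
--     else:
--         answer="아니야 조금만 더 기다려"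
--     return answer
-- ===== SOURCE B (Python) =====
-- def stock_price(stockChart):
--     # one pass: running prefix sum and running max of future gain (>= keeps last argmax)
--     n = len(stockChart)
--     total = sum(stockChart)
--     s = stockChart[0]
--     best = total - s
--     bestIdx = 0
--     for q in range(1, n - 1):
--         s += stockChart[q]
--         v = total - s
--         if v >= best:
--             best, bestIdx = v, q
--     if best > 0:
--         return str((n - 1) - bestIdx) + "일 전에 샀어야지 으이구"
--     return "아니야 조금만 더 기다려"
-- ===== Notes on version B (the rewrite author's own statement) =====
-- stated objective: faster
-- what changed: A materialises the prefix-sum list z and the future-gain list x and then rescans, recomputing max(x) inside the index loop (quadratic); B makes a single forward pass keeping only a running prefix sum and a running (best gain, last argmax) pair, building no intermediate lists.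
import Mathlib
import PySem

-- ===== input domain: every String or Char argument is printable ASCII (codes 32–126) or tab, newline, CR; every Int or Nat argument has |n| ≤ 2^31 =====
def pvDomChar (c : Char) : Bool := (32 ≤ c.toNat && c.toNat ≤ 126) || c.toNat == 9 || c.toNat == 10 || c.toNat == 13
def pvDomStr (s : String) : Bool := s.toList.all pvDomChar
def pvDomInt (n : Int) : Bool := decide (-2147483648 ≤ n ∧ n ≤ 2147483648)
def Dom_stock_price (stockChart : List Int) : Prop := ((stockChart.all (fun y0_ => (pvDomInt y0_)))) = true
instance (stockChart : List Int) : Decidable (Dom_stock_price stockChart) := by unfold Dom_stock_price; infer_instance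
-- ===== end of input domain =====

-- B replaces A's quadratic rescan (max(x) recomputed inside the index loop over the materialised
-- prefix-sum and gain lists) by a single forward pass with a running prefix sum and a running
-- last-argmax of the future gain; objective: faster (O(n) vs O(n^2)).

-- ===== PORT A =====
def stock_price (stockChart : List Int) : String :=
  let zb := stockChart.foldl (fun (acc : List Int × Int) i => (acc.1 ++ [acc.2 + i], acc.2 + i)) (([] : List Int), 0)
  let z := zb.1
  let x := (PySem.List.slice z none (some (-1))).foldl
      (fun acc v => acc ++ [PySem.List.pyGetD z (-1) 0 - v]) ([] : List Int)
  let M := (PySem.List.max? x (fun y => y)).getD 0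
  let m := (PySem.List.pyRange 0 (PySem.List.len x) 1).foldl
      (fun m q => if M == PySem.List.pyGetD x q 0 then q else m) 1
  if 0 < M then PySem.Int.toStr (PySem.List.len x - m) ++ "일 전에 샀어야지 으이구"
  else "아니야 조금만 더 기다려"

-- ===== PORT B =====
def stock_price_alt (stockChart : List Int) : String :=
  let n : Int := PySem.List.len stockChart
  let total := stockChart.sum
  let s0 := PySem.List.pyGetD stockChart 0 0
  let st := (PySem.List.pyRange 1 (n - 1) 1).foldl
      (fun (st : Int × Int × Int) q =>
        let s := st.1 + PySem.List.pyGetD stockChart q 0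
        let v := total - s
        if st.2.1 ≤ v then (s, v, q) else (s, st.2.1, st.2.2))
      (s0, total - s0, 0)
  if 0 < st.2.1 then PySem.Int.toStr ((n - 1) - st.2.2) ++ "일 전에 샀어야지 으이구"
  else "아니야 조금만 더 기다려"

-- ===== PRECONDITION & SPEC =====
-- Pre_ excludes lists of length < 2: there A raises ValueError (max of the empty gain list).
def Pre_stock_price (stockChart : List Int) : Prop := 2 ≤ stockChart.length
instance (stockChart : List Int) : Decidable (Pre_stock_price stockChart) := by unfold Pre_stock_price; infer_instance
def pvWitness_stock_price : List Int := [1, 2]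

def Spec_stock_price (stockChart : List Int) (out : String) : Prop := out = stock_price_alt stockChart
instance (stockChart : List Int) (out : String) : Decidable (Spec_stock_price stockChart out) := by unfold Spec_stock_price; infer_instance

-- ===== CLAIM (what is proved, stated in full; the proofs are below) =====
def Claim_equal_stock_price : Prop := ∀ (stockChart : List Int), Dom_stock_price stockChart → Pre_stock_price stockChart → Spec_stock_price stockChart (stock_price stockChart)


-- ===== LEMMAS AND PROOFS =====

/-- Prefix sums starting from accumulator `b` (the list `z` A builds). -/
def pvPsum : List Int → Int → List Int
  | [], _ => []
  | h :: t, b => (b + h) :: pvPsum t (b + h)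

/-- The future-gain list `x`: x[q] = sum(a) - sum(a[:q+1]) for q = 0 .. len(a)-2. -/
def pvX (a : List Int) : List Int :=
  (List.range (a.length - 1)).map (fun q => a.sum - (a.take (q + 1)).sum)

/-- The running-max step of B's loop, on (best, idx) and an enumerated gain. -/
def pvG (bi : Int × Int) (p : Int × Int) : Int × Int := if bi.1 ≤ p.2 then (p.2, p.1) else bi

lemma pvPsum_length (l : List Int) (b : Int) : (pvPsum l b).length = l.length := by
  induction l generalizing b with
  | nil => rfl
  | cons h t ih => simp [pvPsum, ih]

lemma pvPsum_getElem? (l : List Int) (b : Int) (k : Nat) (hk : k < l.length) :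
    (pvPsum l b)[k]? = some (b + (l.take (k + 1)).sum) := by
  induction l generalizing b k with
  | nil => simp at hk
  | cons h t ih =>
    cases k with
    | zero => simp [pvPsum]
    | succ k =>
      rw [pvPsum, List.getElem?_cons_succ, ih (b + h) k (by simpa using hk)]
      simp [add_assoc]

lemma pvFoldz (l : List Int) (acc : List Int) (b : Int) :
    l.foldl (fun (p : List Int × Int) i => (p.1 ++ [p.2 + i], p.2 + i)) (acc, b)
      = (acc ++ pvPsum l b, b + l.sum) := by
  induction l generalizing acc b with
  | nil => simp [pvPsum]
  | cons h t ih => simp [pvPsum, ih, add_assoc]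

lemma pvSum_take_one (a : List Int) (h : a ≠ []) : (a.take 1).sum = a.getD 0 0 := by
  cases a with
  | nil => exact absurd rfl h
  | cons h t => simp

lemma pvX_getElem? (a : List Int) (k : Nat) (hk : k < a.length - 1) :
    (pvX a)[k]? = some (a.sum - (a.take (k + 1)).sum) := by
  simp [pvX, List.getElem?_map, List.getElem?_range hk]

lemma pvX_length (a : List Int) : (pvX a).length = a.length - 1 := by simp [pvX]

/-- A's gain list equals `pvX a`. -/
lemma pvA_x (a : List Int) (h : 1 ≤ a.length) :
    ((pvPsum a 0).dropLast).map (fun v => a.sum - v) = pvX a := by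
  apply List.ext_getElem?
  intro k
  by_cases hk : k < a.length - 1
  · rw [pvX_getElem? a k hk, List.getElem?_map, List.dropLast_eq_take,
      List.getElem?_take]
    rw [if_pos (by rw [pvPsum_length]; omega), pvPsum_getElem? a 0 k (by omega)]
    simp
  · rw [List.getElem?_eq_none (by rw [List.length_map, List.dropLast_eq_take, List.length_take, pvPsum_length]; omega),
      List.getElem?_eq_none (by rw [pvX_length]; omega)]

/-- Joint invariant: B's running (best, idx) pair computes the max of the gains and the
    last index attaining it, which is exactly what A's rescan loop ends with. -/
lemma pvKey (t : List Int) (x0 : Int) :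
    ((PySem.List.enumerate t 1).foldl pvG (x0, 0)).1 = t.foldl max x0 ∧
    ∀ init : Int,
      (PySem.List.enumerate (x0 :: t) 0).foldl
          (fun m p => if t.foldl max x0 == p.2 then p.1 else m) init
        = ((PySem.List.enumerate t 1).foldl pvG (x0, 0)).2 := by
  induction t using List.reverseRecOn with
  | nil =>
    refine ⟨rfl, fun init => ?_⟩
    simp [PySem.List.enumerate_cons, PySem.List.enumerate_nil]
  | append_singleton t' v ih =>
    obtain ⟨ih1, ih2⟩ := ih
    have henum : PySem.List.enumerate (t' ++ [v]) 1
        = PySem.List.enumerate t' 1 ++ [(1 + (t'.length : Int), v)] := by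
      rw [PySem.List.enumerate_append]
      rfl
    have hfold : (PySem.List.enumerate (t' ++ [v]) 1).foldl pvG (x0, 0)
        = pvG ((PySem.List.enumerate t' 1).foldl pvG (x0, 0)) (1 + (t'.length : Int), v) := by
      rw [henum, List.foldl_append]
      rfl
    have henum2 : PySem.List.enumerate (x0 :: (t' ++ [v])) 0
        = PySem.List.enumerate (x0 :: t') 0 ++ [((0 : Int) + ((x0 :: t').length : Int), v)] := by
      rw [show x0 :: (t' ++ [v]) = (x0 :: t') ++ [v] by simp, PySem.List.enumerate_append]
      rfl
    have hmaxapp : (t' ++ [v]).foldl max x0 = max (t'.foldl max x0) v := by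
      rw [List.foldl_append]
      rfl
    by_cases hle : ((PySem.List.enumerate t' 1).foldl pvG (x0, 0)).1 ≤ v
    · have hM : (t' ++ [v]).foldl max x0 = v := by
        rw [hmaxapp, ← ih1]
        exact max_eq_right hle
      have hg : pvG ((PySem.List.enumerate t' 1).foldl pvG (x0, 0)) (1 + (t'.length : Int), v)
          = (v, 1 + (t'.length : Int)) := by
        simp [pvG, hle]
      refine ⟨by rw [hfold, hg, hM], fun init => ?_⟩
      rw [henum2, List.foldl_append, hfold, hg, hM]
      simp only [List.foldl_cons, List.foldl_nil, beq_iff_eq]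
      simp only [if_true, List.length_cons]
      omega
    · have hlt : v < ((PySem.List.enumerate t' 1).foldl pvG (x0, 0)).1 := by omega
      have hM : (t' ++ [v]).foldl max x0 = t'.foldl max x0 := by
        rw [hmaxapp, ← ih1]
        exact max_eq_left (by omega)
      have hg : pvG ((PySem.List.enumerate t' 1).foldl pvG (x0, 0)) (1 + (t'.length : Int), v)
          = (PySem.List.enumerate t' 1).foldl pvG (x0, 0) := by
        simp [pvG, hle]
      refine ⟨by rw [hfold, hg, hM, ih1], fun init => ?_⟩
      rw [henum2, List.foldl_append, hfold, hg, hM]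
      simp only [List.foldl_cons, List.foldl_nil, beq_iff_eq]
      rw [if_neg (by rw [← ih1]; omega)]
      simp only [beq_iff_eq] at ih2
      exact ih2 init

/-- A's index loop over range(len(x)) is the fold over enumerate(x). -/
lemma pvRange_fold_enum (xs : List Int) (M init : Int) :
    (PySem.List.pyRange 0 (PySem.List.len xs) 1).foldl
        (fun m q => if M == PySem.List.pyGetD xs q 0 then q else m) init
      = (PySem.List.enumerate xs 0).foldl (fun m p => if M == p.2 then p.1 else m) init := by
  have h0 : PySem.List.pyRange 0 (PySem.List.len xs) 1
      = (PySem.List.enumerate xs 0).map (fun p => p.1) := by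
    rw [PySem.List.map_fst_enumerate]
    simp [PySem.List.len_eq]
  rw [h0, List.foldl_map]
  apply PySem.List.foldl_congr_mem
  intro acc p hp
  rw [PySem.List.mem_enumerate_iff] at hp
  obtain ⟨k, hk, rfl⟩ := hp
  simp [PySem.List.pyGetD_natCast, List.getD_eq_getElem?_getD, List.getElem?_eq_getElem hk]

/-- B's loop invariant: after the iterations q = 1 .. k-1, the state is the prefix sum of
    a[:k] together with the (best, idx) scan of the first k gains. -/
lemma pvBloop (a : List Int) (k : Nat) (h1 : 1 ≤ k) (hk : k ≤ a.length - 1) :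
    (PySem.List.pyRange 1 (k : Int) 1).foldl
        (fun (st : Int × Int × Int) q =>
          let s := st.1 + PySem.List.pyGetD a q 0
          let v := a.sum - s
          if st.2.1 ≤ v then (s, v, q) else (s, st.2.1, st.2.2))
        (a.getD 0 0, a.sum - a.getD 0 0, 0)
      = ((a.take k).sum,
         (PySem.List.enumerate (((pvX a).take k).drop 1) 1).foldl pvG (a.sum - a.getD 0 0, 0)) := by
  revert hk
  induction k, h1 using Nat.le_induction with
  | base =>
    intro hk
    rw [PySem.List.pyRange_one_eq_nil (by omega)]
    have hx1 : ((pvX a).take 1).drop 1 = [] := by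
      cases pvX a <;> simp
    rw [hx1]
    simp [PySem.List.enumerate_nil, pvSum_take_one a (by intro h; simp [h] at hk)]
  | succ k hk1 ih =>
    intro hk
    have hlen : a.length ≥ k + 2 := by omega
    have hklt : k < a.length := by omega
    have hkx : k < (pvX a).length := by rw [pvX_length]; omega
    have hrange : PySem.List.pyRange 1 ((k : Int) + 1) 1
        = PySem.List.pyRange 1 (k : Int) 1 ++ [(k : Int)] := PySem.List.pyRange_one_succ_right (by omega)
    rw [show ((k + 1 : Nat) : Int) = (k : Int) + 1 by push_cast; ring, hrange, List.foldl_append,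
      ih (by omega)]
    have hget : PySem.List.pyGetD a (k : Int) 0 = a[k] := by
      rw [PySem.List.pyGetD_natCast, List.getD_eq_getElem?_getD, List.getElem?_eq_getElem hklt]
      rfl
    have hsum : (a.take k).sum + a[k] = (a.take (k + 1)).sum := by
      rw [List.take_add_one, List.sum_append, List.getElem?_eq_getElem hklt]
      simp
    have hxtake : ((pvX a).take (k + 1)).drop 1
        = ((pvX a).take k).drop 1 ++ [a.sum - (a.take (k + 1)).sum] := by
      rw [List.take_add_one, List.drop_append_of_le_length (by simp [List.length_take]; omega)]
      have := pvX_getElem? a k (by rw [← pvX_length]; omega)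
      rw [this]
      rfl
    have hlen2 : (((pvX a).take k).drop 1).length = k - 1 := by
      simp [List.length_take]
      omega
    rw [hxtake, PySem.List.enumerate_append, List.foldl_append, hlen2]
    simp only [PySem.List.enumerate_cons, PySem.List.enumerate_nil, List.foldl_cons, List.foldl_nil]
    have hidx : (1 : Int) + ((k - 1 : Nat) : Int) = (k : Int) := by
      omega
    rw [hidx]
    simp only [pvG, hget]
    rw [show (a.take k).sum + a[k] = (a.take (k+1)).sum from hsum]
    split <;> rfl


-- ===== VERDICT (by name: the statement is the Claim_ definition above) =====
theorem stock_price_spec : Claim_equal_stock_price := by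
  intro a _ hpre
  unfold Pre_stock_price at hpre
  unfold Spec_stock_price
  have hxlen : (pvX a).length = a.length - 1 := pvX_length a
  obtain ⟨x0, t, hxc⟩ : ∃ x0 t, pvX a = x0 :: t := by
    cases h : pvX a with
    | nil =>
      rw [h] at hxlen
      simp at hxlen
      omega
    | cons y ys => exact ⟨y, ys, rfl⟩
  have hane : a ≠ [] := by
    intro h
    rw [h] at hpre
    simp at hpre
  have hz := pvFoldz a [] 0
  rw [List.nil_append] at hz
  have hne : pvPsum a 0 ≠ [] := by
    intro h
    have hl := pvPsum_length a 0
    rw [h] at hl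
    simp at hl
    omega
  have hlast : PySem.List.pyGetD (pvPsum a 0) (-1) 0 = a.sum := by
    rw [PySem.List.pyGetD_neg_one _ _ hne, List.getLast_eq_getElem]
    have h2 := pvPsum_getElem? a 0 ((pvPsum a 0).length - 1) (by rw [pvPsum_length]; omega)
    rw [List.getElem?_eq_getElem (by rw [pvPsum_length]; omega)] at h2
    rw [Option.some_inj.mp h2, pvPsum_length, show a.length - 1 + 1 = a.length by omega,
      List.take_length]
    omega
  have hx0 : x0 = a.sum - a.getD 0 0 := by
    have h0 := pvX_getElem? a 0 (by omega)
    rw [hxc] at h0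
    simp at h0
    rw [h0, pvSum_take_one a hane]
  obtain ⟨hK1, hK2⟩ := pvKey t x0
  simp only [stock_price, stock_price_alt, hz, PySem.List.slice_to_neg_one, hlast,
    PySem.List.pyGetD_zero]
  rw [PySem.List.foldl_append_singleton_eq_map (fun v => a.sum - v)]
  rw [List.nil_append, pvA_x a (by omega), hxc]
  have hM : (PySem.List.max? (x0 :: t) (fun y => y)).getD 0 = t.foldl max x0 := by
    rw [PySem.List.max?_id_cons]
    rfl
  rw [hM, pvRange_fold_enum (x0 :: t) (t.foldl max x0) 1, hK2 1]
  have hcast : PySem.List.len a - 1 = ((a.length - 1 : Nat) : Int) := by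
    rw [PySem.List.len_eq]
    omega
  rw [hcast, pvBloop a (a.length - 1) (by omega) (le_refl _),
    List.take_of_length_le (le_of_eq hxlen), hxc]
  simp only [List.drop_succ_cons, List.drop_zero]
  rw [← hx0]
  have hlen3 : PySem.List.len (x0 :: t) = ((a.length - 1 : Nat) : Int) := by
    rw [PySem.List.len_eq, ← hxc, hxlen]
  rw [hlen3]
  simp [hK1]
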